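-- pv_equiv track=rewrite | github.com/smeryse/SchoolPython | декабрь/14 задание - 2 кучи.py | f
-- ===== SOURCE A (Python) =====
-- def f(s, n, m):
--     if s >= 69:
--         return n % 2 == m % 2
--
--     if n == m:
--         return False
--     h = [f(s + 1, n + 1, m),
--          f(s + 4, n + 1, m),
--          f(s * 5, n + 1, m)]
--
--     if (n + 1) % 2 == m % 2:
--         return any(h)
--     else:
--         return all(h)
-- ===== SOURCE B (Python) =====
-- def f(s, n, m):
--     # The game's outcome depends only on s and the gap d = m - n,
--     # so evaluate the recursion memoized on the state (s, d).
--     memo = {}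
--
--     def win(s, d):
--         if s >= 69:
--             return d % 2 == 0
--         if d == 0:
--             return False
--         key = (s, d)
--         if key not in memo:
--             h = [win(s + 1, d - 1), win(s + 4, d - 1), win(5 * s, d - 1)]
--             memo[key] = any(h) if d % 2 == 1 else all(h)
--         return memo[key]
--
--     return win(s, m - n)
-- ===== Notes on version B (the rewrite author's own statement) =====
-- stated objective: faster
-- what changed: B reduces the state to (s, d) with d = m - n (the answer depends only on the gap and its parity) and memoizes the recursion on these states, turning A's exponential three-way game tree into a polynomial number of evaluated states. Pre_ excludes only inputs on which A never returns a value: s <= 0 with n > m (unbounded recursion) and s <= 0 with m - n >= 900 (exceeds CPython's recursion limit, RecursionError).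
import Mathlib
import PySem

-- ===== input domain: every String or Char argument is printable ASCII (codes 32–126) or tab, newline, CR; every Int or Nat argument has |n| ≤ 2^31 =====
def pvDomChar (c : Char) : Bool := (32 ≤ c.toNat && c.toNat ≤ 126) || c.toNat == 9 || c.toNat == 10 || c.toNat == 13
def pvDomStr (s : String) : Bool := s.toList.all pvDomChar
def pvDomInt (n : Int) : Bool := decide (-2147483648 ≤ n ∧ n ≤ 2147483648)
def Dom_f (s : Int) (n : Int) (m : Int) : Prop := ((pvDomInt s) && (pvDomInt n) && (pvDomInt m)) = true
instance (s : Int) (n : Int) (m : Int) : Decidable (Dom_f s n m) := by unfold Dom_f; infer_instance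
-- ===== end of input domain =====

-- B evaluates the same game recursion memoized on the reduced state (s, d)
-- with d = m - n, replacing A's exponential tree walk.

-- ===== PORT A =====
-- A recurses without a structural bound; the fuel argument only makes the
-- recursion total in Lean and is proved never to run out on Pre_f inputs.
def fA (fuel : Nat) (s : Int) (n : Int) (m : Int) : Bool :=
  if 69 ≤ s then PySem.Int.mod n 2 == PySem.Int.mod m 2
  else if n = m then false
  else match fuel with
  | 0 => false
  | Nat.succ fu =>
    if PySem.Int.mod (n + 1) 2 == PySem.Int.mod m 2 then
      fA fu (s + 1) (n + 1) m || fA fu (s + 4) (n + 1) m || fA fu (s * 5) (n + 1) m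
    else
      fA fu (s + 1) (n + 1) m && fA fu (s + 4) (n + 1) m && fA fu (s * 5) (n + 1) m

def f (s : Int) (n : Int) (m : Int) : Bool := fA ((m - n).toNat + 69) s n m

-- ===== PORT B =====
-- the inner helper `win(s, d)` of Source B, threading the memo dict; fuel only
-- for totality in Lean, never exhausted on Pre_f inputs
def winB (fuel : Nat) (memo : PySem.Dict (Int × Int) Bool) (s : Int) (d : Int) :
    Bool × PySem.Dict (Int × Int) Bool :=
  if 69 ≤ s then (PySem.Int.mod d 2 == 0, memo)
  else if d = 0 then (false, memo)
  else match fuel with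
  | 0 => (false, memo)
  | Nat.succ fu =>
    match memo.get? (s, d) with
    | some v => (v, memo)
    | none =>
      let r1 := winB fu memo (s + 1) (d - 1)
      let r2 := winB fu r1.2 (s + 4) (d - 1)
      let r3 := winB fu r2.2 (5 * s) (d - 1)
      let h := [r1.1, r2.1, r3.1]
      let v := if PySem.Int.mod d 2 == 1 then h.any id else h.all id
      (v, r3.2.insert (s, d) v)

def f_alt (s : Int) (n : Int) (m : Int) : Bool :=
  (winB ((m - n).toNat + 69) PySem.Dict.empty s (m - n)).1

-- ===== PRECONDITION & SPEC =====
-- Pre_f excludes exactly the inputs on which A never returns a value: for s ≤ 0 with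
-- n > m the recursion never terminates (s*5 keeps s away from 69 and n never returns
-- to m), and for s ≤ 0 with m - n ≥ 900 the recursion is ~(m-n) frames deep and
-- overruns CPython's recursion limit (RecursionError; conservative of the ~1000 default).
def Pre_f (s : Int) (n : Int) (m : Int) : Prop := 1 ≤ s ∨ (n ≤ m ∧ m - n < 900)
instance (s : Int) (n : Int) (m : Int) : Decidable (Pre_f s n m) := by unfold Pre_f; infer_instance
def pvWitness_f : Int × Int × Int := (5, 0, 3)

def Spec_f (s : Int) (n : Int) (m : Int) (out : Bool) : Prop := out = f_alt s n m
instance (s : Int) (n : Int) (m : Int) (out : Bool) : Decidable (Spec_f s n m out) := by unfold Spec_f; infer_instance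

-- ===== CLAIM (what is proved, stated in full; the proofs are below) =====
def Claim_equal_f : Prop := ∀ (s : Int) (n : Int) (m : Int), Dom_f s n m → Pre_f s n m → Spec_f s n m (f s n m)

-- ===== LEMMAS AND PROOFS =====

-- pure (memo-free) view of B's recursion on the state (s, d)
def gP (fuel : Nat) (s : Int) (d : Int) : Bool :=
  if 69 ≤ s then d % 2 == 0
  else if d = 0 then false
  else match fuel with
  | 0 => false
  | Nat.succ fu =>
    if d % 2 = 1 then gP fu (s + 1) (d - 1) || gP fu (s + 4) (d - 1) || gP fu (5 * s) (d - 1)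
    else gP fu (s + 1) (d - 1) && gP fu (s + 4) (d - 1) && gP fu (5 * s) (d - 1)

-- fuel sufficient for state (s, d)
def mu (s : Int) (d : Int) : Nat := if 0 ≤ d then d.toNat else (69 - s).toNat

-- states reachable from Pre_f inputs
def OKst (s : Int) (d : Int) : Prop := 1 ≤ s ∨ 0 ≤ d

-- canonical value of a state
def gS (s : Int) (d : Int) : Bool := gP (mu s d) s d

def GoodM (memo : PySem.Dict (Int × Int) Bool) : Prop :=
  ∀ s d v, memo.get? (s, d) = some v → gS s d = v

lemma mod2 (a : Int) : PySem.Int.mod a 2 = a % 2 :=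
  PySem.Int.mod_eq_emod_of_pos (by norm_num)

lemma okChild (s d : Int) (hs : ¬ 69 ≤ s) (hd : ¬ d = 0) (hok : OKst s d) :
    ∀ s' ∈ [s + 1, s + 4, 5 * s], OKst s' (d - 1) ∧ mu s' (d - 1) + 1 ≤ mu s d := by
  intro s' hs'
  have hcase : s' = s + 1 ∨ s' = s + 4 ∨ s' = 5 * s := by
    simpa using hs'
  rcases hok with h1 | h2
  · constructor
    · exact Or.inl (by rcases hcase with h | h | h <;> subst h <;> omega)
    · by_cases hdp : 0 ≤ d - 1
      · have : (0:Int) ≤ d := by omega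
        simp only [mu, if_pos hdp, if_pos this]; omega
      · have hd0 : ¬ 0 ≤ d := by omega
        simp only [mu, if_neg hdp, if_neg hd0]
        rcases hcase with h | h | h <;> subst h <;> omega
  · have hd1 : (1:Int) ≤ d := by omega
    refine ⟨Or.inr (by omega), ?_⟩
    have hdp : (0:Int) ≤ d - 1 := by omega
    have hdd : (0:Int) ≤ d := by omega
    simp only [mu, if_pos hdp, if_pos hdd]; omega

lemma gP_high (fu : Nat) (s d : Int) (hs : 69 ≤ s) : gP fu s d = (d % 2 == 0) := by
  cases fu <;> simp [gP, hs]

lemma gP_zero (fu : Nat) (s : Int) (hs : ¬ 69 ≤ s) : gP fu s 0 = false := by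
  cases fu <;> simp [gP, hs]

lemma mu_pos (s d : Int) (hs : ¬ 69 ≤ s) (hd : d ≠ 0) (hok : OKst s d) : 1 ≤ mu s d := by
  unfold mu; rcases hok with h | h
  · split <;> omega
  · rw [if_pos h]; omega

lemma mu_zero_cases (s d : Int) (hok : OKst s d) (h : mu s d = 0) : 69 ≤ s ∨ d = 0 := by
  unfold mu at h; rcases hok with h1 | h1
  · split at h <;> omega
  · rw [if_pos h1] at h; omega

lemma gP_stable : ∀ (f1 f2 : Nat) (s d : Int), OKst s d → mu s d ≤ f1 → mu s d ≤ f2 →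
    gP f1 s d = gP f2 s d := by
  intro f1
  induction f1 with
  | zero =>
    intro f2 s d hok h1 h2
    by_cases hs : 69 ≤ s
    · rw [gP_high 0 s d hs, gP_high f2 s d hs]
    · rcases mu_zero_cases s d hok (by omega) with h | h
      · omega
      · subst h; rw [gP_zero 0 s hs, gP_zero f2 s hs]
  | succ fu IH =>
    intro f2 s d hok h1 h2
    by_cases hs : 69 ≤ s
    · rw [gP_high _ s d hs, gP_high f2 s d hs]
    · by_cases hd : d = 0
      · subst hd; rw [gP_zero _ s hs, gP_zero f2 s hs]
      · have hmu1 : 1 ≤ mu s d := mu_pos s d hs hd hok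
        obtain ⟨f2', rfl⟩ : ∃ k, f2 = k + 1 := ⟨f2 - 1, by omega⟩
        have hc := okChild s d hs hd hok
        have c1 := hc (s + 1) (by simp)
        have c2 := hc (s + 4) (by simp)
        have c3 := hc (5 * s) (by simp)
        have e1 := IH f2' (s + 1) (d - 1) c1.1 (by omega) (by omega)
        have e2 := IH f2' (s + 4) (d - 1) c2.1 (by omega) (by omega)
        have e3 := IH f2' (5 * s) (d - 1) c3.1 (by omega) (by omega)
        simp only [gP, if_neg hs, if_neg hd]
        rw [e1, e2, e3]

lemma gS_rec (s d : Int) (hs : ¬ 69 ≤ s) (hd : ¬ d = 0) (hok : OKst s d) :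
    gS s d = if d % 2 = 1 then gS (s + 1) (d - 1) || gS (s + 4) (d - 1) || gS (5 * s) (d - 1)
             else gS (s + 1) (d - 1) && gS (s + 4) (d - 1) && gS (5 * s) (d - 1) := by
  have hmu1 : 1 ≤ mu s d := mu_pos s d hs hd hok
  obtain ⟨k, hk⟩ : ∃ k, mu s d = k + 1 := ⟨mu s d - 1, by omega⟩
  have hc := okChild s d hs hd hok
  have c1 := hc (s + 1) (by simp)
  have c2 := hc (s + 4) (by simp)
  have c3 := hc (5 * s) (by simp)
  unfold gS
  rw [hk]
  simp only [gP, if_neg hs, if_neg hd]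
  rw [gP_stable k (mu (s+1) (d-1)) (s+1) (d-1) c1.1 (by omega) (le_refl _),
      gP_stable k (mu (s+4) (d-1)) (s+4) (d-1) c2.1 (by omega) (le_refl _),
      gP_stable k (mu (5*s) (d-1)) (5*s) (d-1) c3.1 (by omega) (le_refl _)]

lemma GoodM_empty : GoodM PySem.Dict.empty := by
  intro s d v h
  simp [PySem.Dict.get?_empty] at h

lemma winB_sound : ∀ (fuel : Nat) (memo : PySem.Dict (Int × Int) Bool) (s d : Int),
    OKst s d → mu s d ≤ fuel → GoodM memo →
    (winB fuel memo s d).1 = gS s d ∧ GoodM (winB fuel memo s d).2 := by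
  intro fuel
  induction fuel with
  | zero =>
    intro memo s d hok hmu hgood
    by_cases hs : 69 ≤ s
    · refine ⟨?_, ?_⟩
      · unfold gS; rw [gP_high _ s d hs, ← mod2]
        simp [winB, hs]
      · simp [winB, hs]; exact hgood
    · rcases mu_zero_cases s d hok (by omega) with h | h
      · omega
      · subst h
        refine ⟨?_, ?_⟩
        · unfold gS; rw [gP_zero _ s hs]
          simp [winB, hs]
        · simp [winB, hs]; exact hgood
  | succ fu IH =>
    intro memo s d hok hmu hgood
    by_cases hs : 69 ≤ s
    · refine ⟨?_, ?_⟩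
      · unfold gS; rw [gP_high _ s d hs, ← mod2]
        simp [winB, hs]
      · simp [winB, hs]; exact hgood
    · by_cases hd : d = 0
      · subst hd
        refine ⟨?_, ?_⟩
        · unfold gS; rw [gP_zero _ s hs]
          simp [winB, hs]
        · simp [winB, hs]; exact hgood
      · rcases hget : memo.get? (s, d) with _ | v
        · -- key absent: three recursive calls, then insert
          have hc := okChild s d hs hd hok
          have c1 := hc (s + 1) (by simp)
          have c2 := hc (s + 4) (by simp)
          have c3 := hc (5 * s) (by simp)
          obtain ⟨e1, g1⟩ := IH memo (s + 1) (d - 1) c1.1 (by omega) hgood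
          obtain ⟨e2, g2⟩ := IH (winB fu memo (s + 1) (d - 1)).2 (s + 4) (d - 1) c2.1 (by omega) g1
          obtain ⟨e3, g3⟩ := IH (winB fu (winB fu memo (s + 1) (d - 1)).2 (s + 4) (d - 1)).2
            (5 * s) (d - 1) c3.1 (by omega) g2
          have hv : (winB (Nat.succ fu) memo s d).1 = gS s d := by
            simp only [winB, if_neg hs, if_neg hd, hget]
            rw [gS_rec s d hs hd hok, mod2]
            by_cases hp : d % 2 = 1
            · rw [if_pos hp, if_pos (by simp [hp])]
              simp [e1, e2, e3, Bool.or_assoc]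
            · rw [if_neg hp, if_neg (by simp [hp])]
              simp [e1, e2, e3, Bool.and_assoc]
          have hm2 : (winB (Nat.succ fu) memo s d).2 =
              (winB fu (winB fu (winB fu memo (s + 1) (d - 1)).2 (s + 4) (d - 1)).2 (5 * s) (d - 1)).2.insert
                (s, d) ((winB (Nat.succ fu) memo s d).1) := by
            simp only [winB, if_neg hs, if_neg hd, hget]
          refine ⟨hv, ?_⟩
          intro s' d' v' hlook
          rw [hm2, PySem.Dict.get?_insert] at hlook
          split at hlook
          · rename_i heq
            have h1 : s' = s := congrArg Prod.fst heq
            have h2 : d' = d := congrArg Prod.snd heq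
            rw [h1, h2]
            have hv' : (winB (Nat.succ fu) memo s d).1 = v' := Option.some.inj hlook
            rw [← hv', hv]
          · exact g3 s' d' v' hlook
        · -- memo hit
          have hval := hgood s d v hget
          have hw : winB (Nat.succ fu) memo s d = (v, memo) := by
            simp only [winB, if_neg hs, if_neg hd, hget]
          rw [hw]
          exact ⟨hval.symm, hgood⟩

-- A's recursion equals the pure (s, d) recursion
lemma fA_eq_gP : ∀ (fuel : Nat) (s n m : Int), fA fuel s n m = gP fuel s (m - n) := by
  intro fuel
  induction fuel with
  | zero =>
    intro s n m
    by_cases hs : 69 ≤ s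
    · simp only [fA, gP, if_pos hs]
      rw [Bool.eq_iff_iff]; simp only [beq_iff_eq, mod2]; omega
    · by_cases hnm : n = m
      · simp [fA, gP, hs, hnm]
      · simp [fA, gP, hs, hnm, show ¬ m - n = 0 by omega]
  | succ fu IH =>
    intro s n m
    by_cases hs : 69 ≤ s
    · simp only [fA, gP, if_pos hs]
      rw [Bool.eq_iff_iff]; simp only [beq_iff_eq, mod2]; omega
    · by_cases hnm : n = m
      · simp [fA, gP, hs, hnm]
      · have hd : ¬ m - n = 0 := by omega
        simp only [fA, gP, if_neg hs, if_neg hnm, if_neg hd]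
        have hcond : (PySem.Int.mod (n + 1) 2 == PySem.Int.mod m 2) = decide ((m - n) % 2 = 1) := by
          rw [Bool.eq_iff_iff]; simp only [beq_iff_eq, mod2, decide_eq_true_eq]; omega
        rw [hcond]
        have hsub : m - (n + 1) = m - n - 1 := by ring
        by_cases hp : (m - n) % 2 = 1
        · rw [if_pos (by simp [hp]), if_pos hp, IH, IH, IH, hsub, mul_comm s 5]
        · rw [if_neg (by simp [hp]), if_neg hp, IH, IH, IH, hsub, mul_comm s 5]

-- ===== VERDICT (by name: the statement is the Claim_ definition above) =====
theorem f_spec : Claim_equal_f := by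
  intro s n m _ hpre
  unfold Spec_f f f_alt
  have hok : OKst s (m - n) := by
    rcases hpre with h | h
    · exact Or.inl h
    · exact Or.inr (by omega)
  have hmu : mu s (m - n) ≤ (m - n).toNat + 69 := by
    unfold mu; split
    · omega
    · rcases hpre with h | h
      · omega
      · omega
  obtain ⟨hval, _⟩ := winB_sound ((m - n).toNat + 69) PySem.Dict.empty s (m - n) hok hmu GoodM_empty
  rw [hval, fA_eq_gP]
  unfold gS
  exact gP_stable _ _ s (m - n) hok hmu (le_refl _)
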